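-- pv_equiv track=rewrite | github.com/atefkbenothman/plaid | backend/src/plaid/client.py | retrieve_category
-- ===== SOURCE A (Python) =====
-- def retrieve_category(category_name: str) -> str:
--   """
--   custom category lookup.
--   """
--   cats = {
--     "wants": [
--       "travel",
--       "taxi",
--       "food and drink",
--       "restaurants",
--       "fast food",
--       "cofee shop",
--     ],
--     "needs": [
--       "payment",
--       "credit card",
--       "credit",
--       "transfer",
--     ]
--   }
--   for cat in cats:
--     for sub_cat in cats[cat]:
--       if category_name.lower() == sub_cat:
--         return cat
--   return "no-cat"
-- ===== SOURCE B (Python) =====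
-- # Sorted (sub-category, parent) table; looked up by hand-written binary search.
-- _TABLE = [
--   ("cofee shop", "wants"),
--   ("credit", "needs"),
--   ("credit card", "needs"),
--   ("fast food", "wants"),
--   ("food and drink", "wants"),
--   ("payment", "needs"),
--   ("restaurants", "wants"),
--   ("taxi", "wants"),
--   ("transfer", "needs"),
--   ("travel", "wants"),
-- ]
--
-- def retrieve_category(category_name: str) -> str:
--   lc = category_name.lower()
--   lo, hi = 0, len(_TABLE)
--   while lo < hi:
--     mid = (lo + hi) // 2
--     key, cat = _TABLE[mid]
--     if key == lc:
--       return cat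
--     if key < lc:
--       lo = mid + 1
--     else:
--       hi = mid
--   return "no-cat"
-- ===== Notes on version B (the rewrite author's own statement) =====
-- stated objective: alternative
-- what changed: Replaces A's nested linear scan over a dict of sub-category lists with a lexicographically sorted (sub-category, parent) table queried by a hand-written binary search (O(log n) string comparisons instead of O(n) equality tests).
import Mathlib
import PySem

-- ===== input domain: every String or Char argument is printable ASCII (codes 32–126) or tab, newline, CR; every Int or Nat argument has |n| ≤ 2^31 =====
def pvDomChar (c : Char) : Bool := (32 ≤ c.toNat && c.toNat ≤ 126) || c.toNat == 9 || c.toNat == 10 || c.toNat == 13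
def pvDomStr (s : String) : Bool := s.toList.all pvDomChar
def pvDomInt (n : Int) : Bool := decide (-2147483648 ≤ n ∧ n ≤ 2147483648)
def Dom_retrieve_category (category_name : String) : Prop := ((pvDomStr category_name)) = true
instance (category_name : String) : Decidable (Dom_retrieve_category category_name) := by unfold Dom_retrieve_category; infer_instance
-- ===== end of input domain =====

-- B replaces A's nested linear scan by a binary search over a sorted (sub-category, parent) table (alternative algorithm).

-- ===== PORT A =====
-- inner loop: 'for sub_cat in cats[cat]: if lc == sub_cat: return cat'
def pvInner (lc : String) (cat : String) : List String → Option String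
  | [] => none
  | sc :: rest => if lc == sc then some cat else pvInner lc cat rest

-- outer loop: 'for cat in cats: …'
def pvOuter (lc : String) : List (String × List String) → String
  | [] => "no-cat"
  | (cat, subs) :: rest =>
      match pvInner lc cat subs with
      | some r => r
      | none => pvOuter lc rest

def pvCats : List (String × List String) :=
  [("wants", ["travel", "taxi", "food and drink", "restaurants", "fast food", "cofee shop"]),
   ("needs", ["payment", "credit card", "credit", "transfer"])]

def retrieve_category (category_name : String) : String :=
  pvOuter (PySem.Str.lower category_name) pvCats

-- ===== PORT B =====
-- Source B's sorted table literal
def pvTable : List (String × String) :=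
  [("cofee shop", "wants"), ("credit", "needs"), ("credit card", "needs"),
   ("fast food", "wants"), ("food and drink", "wants"), ("payment", "needs"),
   ("restaurants", "wants"), ("taxi", "wants"), ("transfer", "needs"),
   ("travel", "wants")]

-- Source B's 'while lo < hi' binary search; Python string '<' = Lean String '<'
-- (both lexicographic by code point), '//2' on nonnegative ints = Nat '/2'.
-- fuel = hi - lo bounds the loop's iterations (hi - lo shrinks each turn); it is
-- only a totality guard, the computation is Source B's loop step for step.
-- Python's 'key < lc' is lexicographic by code point = Lean's List.lt on the char lists.
def pvSearch : Nat → String → Nat → Nat → String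
  | 0, _, _, _ => "no-cat"
  | fuel + 1, lc, lo, hi =>
      if lo < hi then
        let mid := (lo + hi) / 2
        let p := pvTable.getD mid ("", "")
        if p.1 == lc then p.2
        else if p.1.toList < lc.toList then pvSearch fuel lc (mid + 1) hi
        else pvSearch fuel lc lo mid
      else "no-cat"

def retrieve_category_alt (category_name : String) : String :=
  pvSearch pvTable.length (PySem.Str.lower category_name) 0 pvTable.length

-- ===== PRECONDITION & SPEC =====
def Spec_retrieve_category (category_name : String) (out : String) : Prop := out = retrieve_category_alt category_name
instance (category_name : String) (out : String) : Decidable (Spec_retrieve_category category_name out) := by unfold Spec_retrieve_category; infer_instance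

-- ===== CLAIM (what is proved, stated in full; the proofs are below) =====
def Claim_equal_retrieve_category : Prop := ∀ (category_name : String), Dom_retrieve_category category_name → Spec_retrieve_category category_name (retrieve_category category_name)

-- ===== LEMMAS AND PROOFS =====

-- if lc matches no table key, the binary search falls through to "no-cat"
theorem pvSearch_no_key (lc : String) (hk : ∀ p ∈ pvTable, lc ≠ p.1) :
    ∀ n lo hi, hi - lo ≤ n → hi ≤ pvTable.length → pvSearch n lc lo hi = "no-cat" := by
  intro n
  induction n with
  | zero =>
      intro lo hi hle _
      rfl
  | succ m ih =>
      intro lo hi hle hhi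
      rw [pvSearch]
      by_cases h : lo < hi
      · simp only [if_pos h]
        have hmid : (lo + hi) / 2 < pvTable.length := by omega
        have hmem : pvTable.getD ((lo + hi) / 2) ("", "") ∈ pvTable := by
          rw [List.getD_eq_getElem?_getD, List.getElem?_eq_getElem hmid]
          exact List.getElem_mem hmid
        have hne : ¬ ((pvTable.getD ((lo + hi) / 2) ("", "")).1 == lc) := by
          simp only [beq_iff_eq]
          exact fun h' => hk _ hmem h'.symm
        simp only [hne]
        by_cases hlt : (pvTable.getD ((lo + hi) / 2) ("", "")).1.toList < lc.toList
        · simp only [hlt, if_true]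
          exact ih ((lo + hi) / 2 + 1) hi (by omega) hhi
        · simp only [hlt, if_false]
          exact ih lo ((lo + hi) / 2) (by omega) (by omega)
      · simp only [if_neg h]

set_option maxHeartbeats 2000000 in
theorem pvChains_eq (t : String) : pvOuter t pvCats = pvSearch pvTable.length t 0 pvTable.length := by
  by_cases h1 : t = "travel"
  · subst h1; decide
  by_cases h2 : t = "taxi"
  · subst h2; decide
  by_cases h3 : t = "food and drink"
  · subst h3; decide
  by_cases h4 : t = "restaurants"
  · subst h4; decide
  by_cases h5 : t = "fast food"
  · subst h5; decide
  by_cases h6 : t = "cofee shop"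
  · subst h6; decide
  by_cases h7 : t = "payment"
  · subst h7; decide
  by_cases h8 : t = "credit card"
  · subst h8; decide
  by_cases h9 : t = "credit"
  · subst h9; decide
  by_cases h10 : t = "transfer"
  · subst h10; decide
  have hk : ∀ p ∈ pvTable, t ≠ p.1 := by
    intro p hp
    simp only [pvTable, List.mem_cons, List.not_mem_nil, or_false] at hp
    rcases hp with rfl | rfl | rfl | rfl | rfl | rfl | rfl | rfl | rfl | rfl <;>
      simp_all
  rw [pvSearch_no_key t hk (pvTable.length) 0 pvTable.length (by omega) (by omega)]
  simp [pvOuter, pvInner, pvCats, h1, h2, h3, h4, h5, h6, h7, h8, h9, h10]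

-- ===== VERDICT (by name: the statement is the Claim_ definition above) =====
theorem retrieve_category_spec : Claim_equal_retrieve_category := by
  intro s _
  unfold Spec_retrieve_category retrieve_category retrieve_category_alt
  exact pvChains_eq _
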